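-- pv_equiv track=rewrite | github.com/GlycReSoft2/embed_tandem_ms_classifier | glycresoft_ms2_classification/theoretical_glycopeptide.py | get_glycan_identities
-- ===== SOURCE A (Python) =====
-- def get_glycan_identities(colnames):
--     glycan_identity = []
--     extract_state = False
--     for col in colnames:
--         if col == "Hypothesis MW":
--             extract_state = True
--             continue
--         elif col == "Adduct/Replacement":
--             extract_state = False
--             break
--         elif extract_state:
--             glycan_identity.append(col.replace("G:", ""))
--     return glycan_identity
-- ===== SOURCE B (Python) =====
-- def get_glycan_identities(colnames):
--     if "Hypothesis MW" not in colnames: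
--         return []
--     start = colnames.index("Hypothesis MW")
--     end = colnames.index("Adduct/Replacement") if "Adduct/Replacement" in colnames else len(colnames)
--     if end < start:
--         return []
--     return [c.replace("G:", "") for c in colnames[start + 1:end]]
-- ===== Notes on version B (the rewrite author's own statement) =====
-- stated objective: alternative
-- what changed: Replaces the running extract_state flag loop by an explicit decomposition: find the two marker indices, decide emptiness from their relative order, slice between them, and map the slice; Pre_ excludes lists where 'Hypothesis MW' reoccurs inside the extracted region, a duplicate-marker corner on which skipping or keeping the repeated marker column are both defensible.
-- outside the precondition, e.g. on get_glycan_identities(['Hypothesis MW', 'Hypothesis MW']): A returns [], B returns ['Hypothesis MW']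
import Mathlib
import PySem

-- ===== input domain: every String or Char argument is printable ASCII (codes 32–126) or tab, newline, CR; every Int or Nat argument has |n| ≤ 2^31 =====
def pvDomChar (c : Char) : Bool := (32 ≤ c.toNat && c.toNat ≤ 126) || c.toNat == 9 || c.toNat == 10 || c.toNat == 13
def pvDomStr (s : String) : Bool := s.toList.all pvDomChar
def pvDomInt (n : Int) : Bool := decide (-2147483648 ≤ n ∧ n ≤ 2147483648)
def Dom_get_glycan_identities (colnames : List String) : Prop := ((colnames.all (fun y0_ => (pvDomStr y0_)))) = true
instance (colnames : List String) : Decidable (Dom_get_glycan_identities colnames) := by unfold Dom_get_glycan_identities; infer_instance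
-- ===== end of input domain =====

-- B replaces A's running extract_state-flag loop by an explicit decomposition — find both
-- marker indices, decide emptiness from their order, slice between them, map — same cost.

-- ===== PORT A =====
-- the for-loop with its `extract_state` flag; `break` on "Adduct/Replacement" ends the loop,
-- so the recursion returns [] there; append-in-loop becomes cons onto the recursive result.
def pvGoA (cols : List String) (st : Bool) : List String :=
  match cols with
  | [] => []
  | c :: rest =>
    if c = "Hypothesis MW" then pvGoA rest true
    else if c = "Adduct/Replacement" then []
    else if st then PySem.Str.replace c "G:" "" :: pvGoA rest st
    else pvGoA rest st

def get_glycan_identities (colnames : List String) : List String :=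
  pvGoA colnames false

-- ===== PORT B =====
-- `"v" in x` + `x.index(v)` is PySem.List.index?; the slice and the comprehension follow Source B.
def get_glycan_identities_alt (colnames : List String) : List String :=
  match PySem.List.index? colnames "Hypothesis MW" with
  | none => []
  | some start =>
    let stop : Nat :=
      match PySem.List.index? colnames "Adduct/Replacement" with
      | some j => j
      | none => colnames.length
    if stop < start then []
    else
      (PySem.List.slice colnames (some ((start : Int) + 1)) (some (stop : Int))).map
        (fun c => PySem.Str.replace c "G:" "")

-- ===== PRECONDITION & SPEC =====
-- Pre_ excludes lists where "Hypothesis MW" reoccurs inside the extracted region (between its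
-- first occurrence and the region's end): a duplicate-marker corner on which A's skipping of the
-- repeated marker column and B's keeping it are both defensible.
def Pre_get_glycan_identities (colnames : List String) : Prop :=
  match PySem.List.index? colnames "Hypothesis MW" with
  | none => True
  | some i =>
      "Hypothesis MW" ∉
        (match PySem.List.index? (colnames.drop (i + 1)) "Adduct/Replacement" with
         | none => colnames.drop (i + 1)
         | some j => (colnames.drop (i + 1)).take j)
instance (colnames : List String) : Decidable (Pre_get_glycan_identities colnames) := by
  unfold Pre_get_glycan_identities
  cases PySem.List.index? colnames "Hypothesis MW" <;> infer_instance

def pvWitness_get_glycan_identities : List String :=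
  ["ID", "Hypothesis MW", "G:Hex", "G:Fuc", "Adduct/Replacement", "Score"]

def Spec_get_glycan_identities (colnames : List String) (out : List String) : Prop := out = get_glycan_identities_alt colnames
instance (colnames : List String) (out : List String) : Decidable (Spec_get_glycan_identities colnames out) := by unfold Spec_get_glycan_identities; infer_instance

-- ===== CLAIM (what is proved, stated in full; the proofs are below) =====
def Claim_equal_get_glycan_identities : Prop := ∀ (colnames : List String), Dom_get_glycan_identities colnames → Pre_get_glycan_identities colnames → Spec_get_glycan_identities colnames (get_glycan_identities colnames)

-- ===== LEMMAS AND PROOFS =====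

-- collect phase of A: once the flag is on, A emits everything up to the first
-- "Adduct/Replacement", skipping further "Hypothesis MW" markers, with "G:" replaced
theorem pvGoA_true (l : List String) :
    pvGoA l true =
      ((match PySem.List.index? l "Adduct/Replacement" with
        | some j => l.take j
        | none => l).filter (fun c => c ≠ "Hypothesis MW")).map
        (fun c => PySem.Str.replace c "G:" "") := by
  induction l with
  | nil => simp [pvGoA, PySem.List.index?]
  | cons c rest ih =>
    by_cases hH : c = "Hypothesis MW"
    · subst hH
      rw [PySem.List.index?_cons_of_ne rest (show "Hypothesis MW" ≠ "Adduct/Replacement" by decide)]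
      simp only [pvGoA, ih]
      cases PySem.List.index? rest "Adduct/Replacement" <;> simp
    · by_cases hA : c = "Adduct/Replacement"
      · subst hA
        rw [PySem.List.index?_cons_self]
        simp [pvGoA]
      · rw [PySem.List.index?_cons_of_ne rest hA]
        simp only [pvGoA, if_neg hH, if_neg hA, if_pos, ih]
        cases PySem.List.index? rest "Adduct/Replacement" <;> simp [hH]

theorem pv_filter_id (l : List String) (h : "Hypothesis MW" ∉ l) :
    l.filter (fun c => c ≠ "Hypothesis MW") = l := by
  apply List.filter_eq_self.mpr
  intro a ha
  simp only [decide_eq_true_eq]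
  intro hcontra; exact h (hcontra ▸ ha)

theorem pv_main (l : List String) (hpre : Pre_get_glycan_identities l) :
    pvGoA l false = get_glycan_identities_alt l := by
  induction l with
  | nil => simp [pvGoA, get_glycan_identities_alt, PySem.List.index?]
  | cons c rest ih =>
    by_cases hH : c = "Hypothesis MW"
    · subst hH
      unfold Pre_get_glycan_identities at hpre
      rw [PySem.List.index?_cons_self] at hpre
      simp only [List.drop_succ_cons, List.drop_zero] at hpre
      unfold get_glycan_identities_alt
      rw [PySem.List.index?_cons_self,
          PySem.List.index?_cons_of_ne rest (show "Hypothesis MW" ≠ "Adduct/Replacement" by decide)]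
      cases hj : PySem.List.index? rest "Adduct/Replacement" with
      | none =>
        rw [hj] at hpre
        have hs : PySem.List.slice ("Hypothesis MW" :: rest) (some (1 : Int))
            (some ((rest.length : Int) + 1)) = rest := by
          rw [show (rest.length : Int) + 1 = ((rest.length + 1 : Nat) : Int) by push_cast; ring,
              show (1 : Int) = ((1 : Nat) : Int) by norm_num,
              PySem.List.slice_natCast]
          simp
        simp only [pvGoA, pvGoA_true, hj, Option.map_none]
        rw [pv_filter_id rest hpre]
        simp [hs]
      | some j =>
        rw [hj] at hpre
        have hs : PySem.List.slice ("Hypothesis MW" :: rest) (some (1 : Int))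
            (some ((j : Int) + 1)) = rest.take j := by
          rw [show (j : Int) + 1 = ((j + 1 : Nat) : Int) by push_cast; ring,
              show (1 : Int) = ((1 : Nat) : Int) by norm_num,
              PySem.List.slice_natCast]
          simp
        simp only [pvGoA, pvGoA_true, hj, Option.map_some]
        rw [pv_filter_id _ hpre]
        simp [hs, List.map_take]
    · by_cases hA : c = "Adduct/Replacement"
      · subst hA
        unfold get_glycan_identities_alt
        rw [PySem.List.index?_cons_self, PySem.List.index?_cons_of_ne rest hH]
        cases hi : PySem.List.index? rest "Hypothesis MW" with
        | none => simp [pvGoA, hH]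
        | some i => simp [pvGoA, hH]
      · -- Pre transfers from c :: rest to rest
        have hpre' : Pre_get_glycan_identities rest := by
          unfold Pre_get_glycan_identities at hpre ⊢
          rw [PySem.List.index?_cons_of_ne rest hH] at hpre
          cases hi : PySem.List.index? rest "Hypothesis MW" with
          | none => trivial
          | some i =>
            rw [hi] at hpre
            simpa using hpre
        have hgo : pvGoA (c :: rest) false = pvGoA rest false := by
          simp [pvGoA, hH, hA]
        rw [hgo, ih hpre']
        unfold get_glycan_identities_alt
        rw [PySem.List.index?_cons_of_ne rest hH, PySem.List.index?_cons_of_ne rest hA]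
        cases hi : PySem.List.index? rest "Hypothesis MW" with
        | none => simp
        | some i =>
          cases hj : PySem.List.index? rest "Adduct/Replacement" with
          | none =>
            have hs : PySem.List.slice (c :: rest) (some ((i : Int) + 1 + 1))
                (some ((rest.length : Int) + 1))
                = PySem.List.slice rest (some ((i : Int) + 1)) (some (rest.length : Int)) := by
              rw [show (i : Int) + 1 + 1 = ((i + 2 : Nat) : Int) by push_cast; ring,
                  show (i : Int) + 1 = ((i + 1 : Nat) : Int) by push_cast; ring,
                  show (rest.length : Int) + 1 = ((rest.length + 1 : Nat) : Int) by push_cast; ring,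
                  show (rest.length : Int) = ((rest.length : Nat) : Int) by ring,
                  PySem.List.slice_natCast, PySem.List.slice_natCast]
              simp only [List.drop_succ_cons]
              congr 1
              omega
            simp only [Option.map_some, Option.map_none, List.length_cons,
              Nat.add_lt_add_iff_right, Nat.cast_add, Nat.cast_one]
            by_cases hlt : rest.length < i
            · simp [hlt]
            · rw [if_neg hlt, if_neg hlt, hs]
          | some j =>
            have hs : PySem.List.slice (c :: rest) (some ((i : Int) + 1 + 1))
                (some ((j : Int) + 1))
                = PySem.List.slice rest (some ((i : Int) + 1)) (some (j : Int)) := by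
              rw [show (i : Int) + 1 + 1 = ((i + 2 : Nat) : Int) by push_cast; ring,
                  show (i : Int) + 1 = ((i + 1 : Nat) : Int) by push_cast; ring,
                  show (j : Int) + 1 = ((j + 1 : Nat) : Int) by push_cast; ring,
                  show (j : Int) = ((j : Nat) : Int) by ring,
                  PySem.List.slice_natCast, PySem.List.slice_natCast]
              simp only [List.drop_succ_cons]
              congr 1
              omega
            simp only [Option.map_some, Nat.add_lt_add_iff_right, Nat.cast_add, Nat.cast_one]
            by_cases hlt : j < i
            · simp [hlt]
            · rw [if_neg hlt, if_neg hlt, hs]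

-- ===== VERDICT (by name: the statement is the Claim_ definition above) =====
theorem get_glycan_identities_spec : Claim_equal_get_glycan_identities := by
  intro colnames _ hpre
  unfold Spec_get_glycan_identities get_glycan_identities
  exact pv_main colnames hpre
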